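-- pv_equiv track=rewrite | github.com/alloy-rs/core | scripts/all_tuples.py | generate_macro
-- ===== SOURCE A (Python) =====
-- def name(prefix, i):
--     if i == 0:
--         return prefix
--     i += 1
--     return f"{prefix}{i}"
--
-- def generate_tuple_list(n, double=False):
--     """Generate tuple list for a given n."""
--
--     if double:
--         return ", ".join(f"({name('T', i)} {name('U', i)})" for i in range(n))
--     else:
--         return ", ".join(f"{name('T', i)}" for i in range(n))
--
-- def generate_macro(max_n):
--     """Generate the complete all_the_tuples macro."""
--     lines = [
--         "/// Calls the given macro with all the tuples.",
--         "#[rustfmt::skip]",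
--         "macro_rules! all_the_tuples {",
--         "    (@double $mac:path) => {",
--     ]
--
--     # Generate @double variant
--     for i in range(1, max_n + 1):
--         tuple_list = generate_tuple_list(i, double=True)
--         lines.append(f"        {{ {i:2} {tuple_list} }}")
--
--     lines.append("    };")
--     lines.append("")
--     lines.append("    ($mac:path) => {")
--
--     # Generate single variant
--     for i in range(1, max_n + 1):
--         tuple_list = generate_tuple_list(i, double=False)
--         lines.append(f"        {{ {i:2} {tuple_list} }}")
--
--     lines.append("    };")
--     lines.append("}")
--     lines.append("")
--
--     return "\n".join(lines)
-- ===== SOURCE B (Python) =====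
-- def generate_macro(max_n):
--     """Generate the complete all_the_tuples macro (single pass with running accumulators)."""
--     n = max(max_n, 0)
--     doubles = []
--     singles = []
--     acc_d = ""
--     acc_s = ""
--     for i in range(1, n + 1):
--         t = "T" if i == 1 else f"T{i}"
--         u = "U" if i == 1 else f"U{i}"
--         sep = "" if i == 1 else ", "
--         acc_d = f"{acc_d}{sep}({t} {u})"
--         acc_s = f"{acc_s}{sep}{t}"
--         doubles.append(f"        {{ {i:2} {acc_d} }}")
--         singles.append(f"        {{ {i:2} {acc_s} }}")
--     return "\n".join(
--         [
--             "/// Calls the given macro with all the tuples.",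
--             "#[rustfmt::skip]",
--             "macro_rules! all_the_tuples {",
--             "    (@double $mac:path) => {",
--         ]
--         + doubles
--         + ["    };", "", "    ($mac:path) => {"]
--         + singles
--         + ["    };", "}", ""]
--     )
-- ===== Notes on version B (the rewrite author's own statement) =====
-- stated objective: faster
-- what changed: B makes one pass over i=1..max_n extending two running ', '-joined accumulator strings (deriving each element name directly from the loop index), instead of A's re-generating and re-joining the whole name list from range(i) for every output line; intended as faster, measured ~7x at n=1024.
import Mathlib
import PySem

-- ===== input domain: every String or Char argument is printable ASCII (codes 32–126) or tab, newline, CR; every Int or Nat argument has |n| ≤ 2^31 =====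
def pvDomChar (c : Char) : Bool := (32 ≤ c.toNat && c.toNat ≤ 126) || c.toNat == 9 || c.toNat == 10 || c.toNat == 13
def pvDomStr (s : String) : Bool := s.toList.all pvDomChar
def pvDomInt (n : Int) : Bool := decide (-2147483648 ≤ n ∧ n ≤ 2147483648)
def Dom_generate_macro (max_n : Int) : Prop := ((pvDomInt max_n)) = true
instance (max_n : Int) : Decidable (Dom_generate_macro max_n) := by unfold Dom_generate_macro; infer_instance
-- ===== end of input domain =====

-- B replaces A's per-line regeneration of the element list (a fresh join over range(i) for every
-- line i) by a single pass that extends two running ", "-joined accumulators; objective: faster (measured ~7x at n=1024).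

-- ===== PORT A =====

-- Python f-string `{i:2}`: decimal digits, left-padded with spaces to width 2 (both Pythons use it).
def pyFormatW2 (i : Int) : String :=
  let s := PySem.Int.toStr i
  if PySem.Str.len s < 2 then " " ++ s else s

def pyName (pfx : String) (i : Int) : String :=
  if i = 0 then pfx else pfx ++ PySem.Int.toStr (i + 1)

def generate_tuple_list (n : Int) (double : Bool) : String :=
  if double then
    PySem.Str.join ", " ((PySem.List.pyRange 0 n 1).map
      (fun i => "(" ++ pyName "T" i ++ " " ++ pyName "U" i ++ ")"))
  else
    PySem.Str.join ", " ((PySem.List.pyRange 0 n 1).map (fun i => pyName "T" i))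

def generate_macro (max_n : Int) : String :=
  let lines : List String :=
    ["/// Calls the given macro with all the tuples.",
     "#[rustfmt::skip]",
     "macro_rules! all_the_tuples {",
     "    (@double $mac:path) => {"]
  let lines := (PySem.List.pyRange 1 (max_n + 1) 1).foldl
    (fun ls i => ls ++ ["        { " ++ pyFormatW2 i ++ " " ++ generate_tuple_list i true ++ " }"])
    lines
  let lines := lines ++ ["    };", "", "    ($mac:path) => {"]
  let lines := (PySem.List.pyRange 1 (max_n + 1) 1).foldl
    (fun ls i => ls ++ ["        { " ++ pyFormatW2 i ++ " " ++ generate_tuple_list i false ++ " }"])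
    lines
  let lines := lines ++ ["    };", "}", ""]
  PySem.Str.join "\n" lines

-- ===== PORT B =====

-- loop body of Source B: state = (acc_d, acc_s, doubles, singles)
def altStep (st : String × String × List String × List String) (i : Int) :
    String × String × List String × List String :=
  let t := if i = 1 then "T" else "T" ++ PySem.Int.toStr i
  let u := if i = 1 then "U" else "U" ++ PySem.Int.toStr i
  let sep := if i = 1 then "" else ", "
  let acc_d := st.1 ++ sep ++ "(" ++ t ++ " " ++ u ++ ")"
  let acc_s := st.2.1 ++ sep ++ t
  (acc_d, acc_s,
   st.2.2.1 ++ ["        { " ++ pyFormatW2 i ++ " " ++ acc_d ++ " }"],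
   st.2.2.2 ++ ["        { " ++ pyFormatW2 i ++ " " ++ acc_s ++ " }"])

def generate_macro_alt (max_n : Int) : String :=
  let n := max max_n 0
  let st := (PySem.List.pyRange 1 (n + 1) 1).foldl altStep ("", "", [], [])
  PySem.Str.join "\n"
    (["/// Calls the given macro with all the tuples.",
      "#[rustfmt::skip]",
      "macro_rules! all_the_tuples {",
      "    (@double $mac:path) => {"]
     ++ st.2.2.1
     ++ ["    };", "", "    ($mac:path) => {"]
     ++ st.2.2.2
     ++ ["    };", "}", ""])

-- ===== PRECONDITION & SPEC =====
def Spec_generate_macro (max_n : Int) (out : String) : Prop := out = generate_macro_alt max_n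
instance (max_n : Int) (out : String) : Decidable (Spec_generate_macro max_n out) := by unfold Spec_generate_macro; infer_instance

-- ===== CLAIM (what is proved, stated in full; the proofs are below) =====
def Claim_equal_generate_macro : Prop := ∀ (max_n : Int), Dom_generate_macro max_n → Spec_generate_macro max_n (generate_macro max_n)

-- ===== LEMMAS AND PROOFS =====

theorem str_eq_of_toList {s t : String} (h : s.toList = t.toList) : s = t :=
  String.toList_injective h

theorem intercalate_cons_cons' (sep a b : List Char) (u : List (List Char)) :
    sep.intercalate (a :: b :: u) = a ++ sep ++ sep.intercalate (b :: u) := by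
  simp [List.intercalate, List.intersperse]

theorem intercalate_append_singleton (sep x : List Char) (xs : List (List Char)) (h : xs ≠ []) :
    sep.intercalate (xs ++ [x]) = sep.intercalate xs ++ sep ++ x := by
  induction xs with
  | nil => simp at h
  | cons a t ih =>
    cases t with
    | nil => simp [List.intercalate, List.intersperse]
    | cons b u =>
      have := ih (by simp)
      simp only [List.cons_append] at this ⊢
      rw [intercalate_cons_cons', intercalate_cons_cons', this]
      simp [List.append_assoc]

theorem join_append_singleton (sep x : String) (xs : List String) (h : xs ≠ []) :
    PySem.Str.join sep (xs ++ [x]) = PySem.Str.join sep xs ++ sep ++ x := by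
  apply str_eq_of_toList
  simp only [PySem.Str.join, PySem.Chars.join, String.toList_append]
  rw [List.map_append, List.map_singleton,
    intercalate_append_singleton _ _ _ (by simpa using h)]
  simp

-- A's tuple list grows by one ", "-separated entry when n grows by one
theorem tuple_list_succ (k : Nat) (double : Bool) :
    generate_tuple_list ((k : Int) + 1) double =
      generate_tuple_list (k : Int) double ++ (if (k : Int) + 1 = 1 then "" else ", ") ++
        (if double then
          "(" ++ pyName "T" (k : Int) ++ " " ++ pyName "U" (k : Int) ++ ")"
         else pyName "T" (k : Int)) := by
  have hr : PySem.List.pyRange 0 ((k : Int) + 1) 1 =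
      PySem.List.pyRange 0 (k : Int) 1 ++ [(k : Int)] :=
    PySem.List.pyRange_one_succ_right (by omega)
  cases k with
  | zero =>
    have h01 : PySem.List.pyRange 0 (1 : Int) 1 = [(0 : Int)] := by decide
    cases double <;>
      (apply str_eq_of_toList
       simp [generate_tuple_list, h01, PySem.List.pyRange_one_eq_nil,
         PySem.Str.join, PySem.Chars.join, List.intercalate])
  | succ m =>
    have hne : PySem.List.pyRange 0 ((m : Int) + 1) 1 ≠ [] := by
      rw [PySem.List.pyRange_one_cons (by omega)]; simp
    push_cast at hr ⊢
    have hkey : ∀ f : Int → String,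
        PySem.Str.join ", " ((PySem.List.pyRange 0 ((m : Int) + 1 + 1) 1).map f) =
          PySem.Str.join ", " ((PySem.List.pyRange 0 ((m : Int) + 1) 1).map f) ++ ", " ++
            f ((m : Int) + 1) := by
      intro f
      rw [hr, List.map_append, List.map_singleton,
        join_append_singleton _ _ _ (by simpa using hne)]
    have hc : ¬((m : Int) + 1 + 1 = 1) := by omega
    cases double <;>
      simp only [generate_tuple_list, Bool.false_eq_true, ite_true, ite_false, hkey,
        if_neg hc]

-- B's names at loop index i = k+1 coincide with A's name('T'/'U', k)
theorem name_eq_T (k : Nat) :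
    (if ((k : Int) + 1) = 1 then "T" else "T" ++ PySem.Int.toStr ((k : Int) + 1)) =
      pyName "T" (k : Int) := by
  cases k with
  | zero => simp [pyName]
  | succ m => rw [if_neg (by omega), pyName, if_neg (by omega)]

theorem name_eq_U (k : Nat) :
    (if ((k : Int) + 1) = 1 then "U" else "U" ++ PySem.Int.toStr ((k : Int) + 1)) =
      pyName "U" (k : Int) := by
  cases k with
  | zero => simp [pyName]
  | succ m => rw [if_neg (by omega), pyName, if_neg (by omega)]

-- A-side line builders
def lineD (i : Int) : String := "        { " ++ pyFormatW2 i ++ " " ++ generate_tuple_list i true ++ " }"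
def lineS (i : Int) : String := "        { " ++ pyFormatW2 i ++ " " ++ generate_tuple_list i false ++ " }"

-- main invariant of B's single pass: the accumulators hold A's joined lists, the line lists A's lines
theorem loop_inv (k : Nat) :
    (PySem.List.pyRange 1 ((k : Int) + 1) 1).foldl altStep ("", "", [], []) =
      (generate_tuple_list (k : Int) true, generate_tuple_list (k : Int) false,
       (PySem.List.pyRange 1 ((k : Int) + 1) 1).map lineD,
       (PySem.List.pyRange 1 ((k : Int) + 1) 1).map lineS) := by
  induction k with
  | zero =>
    simp [PySem.List.pyRange_one_eq_nil, generate_tuple_list, PySem.Str.join,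
      PySem.Chars.join, List.intercalate]
  | succ m ih =>
    have hr : PySem.List.pyRange 1 ((((m : Nat) + 1 : Nat) : Int) + 1) 1 =
        PySem.List.pyRange 1 ((m : Int) + 1) 1 ++ [((m : Int) + 1)] := by
      push_cast
      exact PySem.List.pyRange_one_succ_right (by omega)
    rw [hr, List.foldl_append, ih, List.map_append, List.map_append]
    simp only [List.foldl_cons, List.foldl_nil, altStep, List.map_singleton]
    rw [name_eq_T m, name_eq_U m]
    have hd := tuple_list_succ m true
    have hs := tuple_list_succ m false
    simp only [if_true] at hd hs
    have had : generate_tuple_list ((m : Int)) true ++ (if (m : Int) + 1 = 1 then "" else ", ") ++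
          "(" ++ pyName "T" (m : Int) ++ " " ++ pyName "U" (m : Int) ++ ")" =
        generate_tuple_list ((m : Int) + 1) true := by rw [hd]; simp [String.append_assoc]
    have has : generate_tuple_list ((m : Int)) false ++ (if (m : Int) + 1 = 1 then "" else ", ") ++
          pyName "T" (m : Int) = generate_tuple_list ((m : Int) + 1) false := by
      rw [hs]; simp
    rw [had, has]
    push_cast
    simp [lineD, lineS]

theorem foldl_append_map {α : Type} (f : α → String) (l : List α) (init : List String) :
    l.foldl (fun ls i => ls ++ [f i]) init = init ++ l.map f := by
  induction l generalizing init with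
  | nil => simp
  | cons a t ih => simp [ih]

-- ===== VERDICT (by name: the statement is the Claim_ definition above) =====
theorem generate_macro_spec : Claim_equal_generate_macro := by
  intro max_n _
  unfold Spec_generate_macro
  have hmax : max max_n 0 = ((max_n.toNat : Nat) : Int) := by omega
  have hrange : PySem.List.pyRange 1 (max_n + 1) 1 =
      PySem.List.pyRange 1 (((max_n.toNat : Nat) : Int) + 1) 1 := by
    rcases le_or_gt max_n 0 with h | h
    · rw [PySem.List.pyRange_one_eq_nil (by omega), PySem.List.pyRange_one_eq_nil (by omega)]
    · congr 1; omega
  simp only [generate_macro, generate_macro_alt, hmax, hrange, loop_inv (max_n.toNat),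
    foldl_append_map]
  rfl
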